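-- pv_equiv track=rewrite | github.com/bachelor-dou/Agent-skils | github_hot_projects/agent.py | _collect_unresolved_constraints
-- ===== SOURCE A (Python) =====
-- def _collect_unresolved_constraints(raw_unresolved: object, dropped_keys: list[str]) -> list[str]:
--     """收集路由输出中的未解析约束和本地丢弃的参数键。"""
--     unresolved: list[str] = []
--     if isinstance(raw_unresolved, list):
--         unresolved.extend(
--             str(item).strip()
--             for item in raw_unresolved
--             if str(item).strip()
--         )
--     unresolved.extend(f"无法映射参数名: {key}" for key in dropped_keys)
--     return list(dict.fromkeys(unresolved))
-- ===== SOURCE B (Python) =====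
-- def _dedup_purge(xs: list[str]) -> list[str]:
--     """First-occurrence dedup by head-and-purge: emit the head, then purge every
--     later copy of it from the rest; repeat on what is left. No dict/set is used."""
--     out: list[str] = []
--     while xs:
--         h = xs[0]
--         out.append(h)
--         xs = [x for x in xs[1:] if x != h]
--     return out
--
--
-- def _collect_unresolved_constraints(raw_unresolved: object, dropped_keys: list[str]) -> list[str]:
--     """Head-and-purge dedup over the combined stream instead of dict.fromkeys."""
--     msgs = ["无法映射参数名: " + str(key) for key in dropped_keys]
--     if not isinstance(raw_unresolved, list):
--         return _dedup_purge(msgs)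
--     cleaned = [str(item).strip() for item in raw_unresolved]
--     return _dedup_purge([s for s in cleaned if s != ""] + msgs)
-- ===== Notes on version B (the rewrite author's own statement) =====
-- stated objective: alternative
-- what changed: Replaces A's hash-based dict.fromkeys dedup with a head-and-purge dedup (emit the head, filter every later copy out of the remainder, repeat), so no dict or set is maintained; the first source is cleaned by a map stage then a separate filter stage instead of one guarded comprehension. Trades A's expected-linear hashing for a quadratic but hash-free scheme.
import Mathlib
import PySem

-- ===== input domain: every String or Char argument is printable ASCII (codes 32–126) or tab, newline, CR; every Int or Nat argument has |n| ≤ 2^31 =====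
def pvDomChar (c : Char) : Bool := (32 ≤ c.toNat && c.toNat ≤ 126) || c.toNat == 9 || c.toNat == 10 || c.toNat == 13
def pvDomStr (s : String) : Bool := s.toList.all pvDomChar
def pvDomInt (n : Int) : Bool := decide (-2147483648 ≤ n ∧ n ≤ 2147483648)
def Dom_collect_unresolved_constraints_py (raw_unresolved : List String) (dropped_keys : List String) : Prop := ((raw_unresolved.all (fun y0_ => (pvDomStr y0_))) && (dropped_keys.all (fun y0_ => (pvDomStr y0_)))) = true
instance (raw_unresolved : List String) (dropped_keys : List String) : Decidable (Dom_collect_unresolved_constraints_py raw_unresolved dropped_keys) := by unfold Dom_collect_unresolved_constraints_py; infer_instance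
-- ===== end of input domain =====

-- B replaces A's dict.fromkeys dedup with a head-and-purge dedup (emit the head, filter its
-- later copies from the rest, repeat); objective: alternative algorithm, not faster.


-- ===== PORT A =====
-- unresolved = [str(item).strip() for item in raw_unresolved if str(item).strip()]
--              + [f"无法映射参数名: {key}" for key in dropped_keys];
-- return list(dict.fromkeys(unresolved))  — PySem.List.dedup is exactly list(dict.fromkeys(·));
-- the isinstance(raw_unresolved, list) guard always holds under the List String typing.
def collect_unresolved_constraints_py (raw_unresolved : List String) (dropped_keys : List String) : List String :=
  let unresolved : List String :=
    (raw_unresolved.filterMap (fun item =>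
        let s := PySem.Str.strip item
        if s = "" then none else some s))
    ++ dropped_keys.map (fun key => "无法映射参数名: " ++ key)
  PySem.List.dedup unresolved

-- ===== PORT B =====
-- _dedup_purge: the while loop 'emit head; xs = [x for x in xs[1:] if x != h]' as the
-- corresponding recursion on the shrinking xs
def pvDedupPurge : List String → List String
  | [] => []
  | h :: t => h :: pvDedupPurge (t.filter (fun x => x != h))
termination_by xs => xs.length
decreasing_by
  simpa using Nat.lt_succ_of_le (List.length_filter_le _ _)

-- msgs list; isinstance guard always true under the typing; cleaned = map strip, then filter
def collect_unresolved_constraints_py_alt (raw_unresolved : List String) (dropped_keys : List String) : List String :=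
  let msgs := dropped_keys.map (fun key => "无法映射参数名: " ++ key)
  let cleaned := raw_unresolved.map (fun item => PySem.Str.strip item)
  pvDedupPurge (cleaned.filter (fun s => s != "") ++ msgs)

-- ===== PRECONDITION & SPEC =====
def Spec_collect_unresolved_constraints_py (raw_unresolved : List String) (dropped_keys : List String) (out : List String) : Prop := out = collect_unresolved_constraints_py_alt raw_unresolved dropped_keys
instance (raw_unresolved : List String) (dropped_keys : List String) (out : List String) : Decidable (Spec_collect_unresolved_constraints_py raw_unresolved dropped_keys out) := by unfold Spec_collect_unresolved_constraints_py; infer_instance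

-- ===== CLAIM (what is proved, stated in full; the proofs are below) =====
def Claim_equal_collect_unresolved_constraints_py : Prop := ∀ (raw_unresolved : List String) (dropped_keys : List String), Dom_collect_unresolved_constraints_py raw_unresolved dropped_keys → Spec_collect_unresolved_constraints_py raw_unresolved dropped_keys (collect_unresolved_constraints_py raw_unresolved dropped_keys)

-- ===== LEMMAS AND PROOFS =====

-- A's guarded comprehension equals B's map-then-filter staging
theorem pvCollect_eq (raw : List String) :
    raw.filterMap (fun item =>
        let s := PySem.Str.strip item
        if s = "" then none else some s)
      = (raw.map (fun item => PySem.Str.strip item)).filter (fun s => s != "") := by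
  induction raw with
  | nil => rfl
  | cons x xs ih =>
    by_cases h : PySem.Str.strip x = "" <;>
      simp [h, ih]

-- invariant of A's fold-with-seen-set dedup versus B's head-and-purge dedup
theorem pvFoldAdd_eq (xs : List String) : ∀ (acc : List String),
    xs.foldl PySem.Set.add acc = acc ++ pvDedupPurge (xs.filter (fun x => !(acc.contains x))) := by
  induction xs with
  | nil => intro acc; simp [pvDedupPurge]
  | cons x t ih =>
    intro acc
    by_cases hx : x ∈ acc
    · have : PySem.Set.add acc x = acc := by
        simp [PySem.Set.add, PySem.Set.contains, hx]
      rw [List.foldl_cons, this, List.filter_cons]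
      simpa [hx] using ih acc
    · have hadd : PySem.Set.add acc x = acc ++ [x] := by
        simp [PySem.Set.add, PySem.Set.contains, hx]
      have hfl : (t.filter (fun y => !acc.contains y)).filter (fun y => y != x)
          = t.filter (fun y => !((acc ++ [x]).contains y)) := by
        rw [List.filter_filter]
        apply List.filter_congr
        intro y _
        by_cases hyx : y = x <;> by_cases hya : y ∈ acc <;>
          simp [hyx, hya]
      have hif : (!acc.contains x) = true := by simp [hx]
      rw [List.foldl_cons, hadd, List.filter_cons, if_pos hif, ih (acc ++ [x]),
        pvDedupPurge, ← hfl]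
      simp

-- hence PySem.List.dedup (= dict.fromkeys) is exactly B's head-and-purge dedup
theorem pvDedup_eq (xs : List String) : PySem.List.dedup xs = pvDedupPurge xs := by
  have h := pvFoldAdd_eq xs []
  simp only [List.contains_nil, Bool.not_false, List.filter_true, List.nil_append] at h
  simpa [PySem.List.dedup_eq_ofList, PySem.Set.ofList_eq_foldl] using h

-- ===== VERDICT (by name: the statement is the Claim_ definition above) =====
theorem collect_unresolved_constraints_py_spec : Claim_equal_collect_unresolved_constraints_py := by
  intro raw dropped _
  show collect_unresolved_constraints_py raw dropped = collect_unresolved_constraints_py_alt raw dropped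
  unfold collect_unresolved_constraints_py collect_unresolved_constraints_py_alt
  simp only [pvCollect_eq, pvDedup_eq]
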